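-- pv_equiv track=rewrite | github.com/23himanshusingh/PYTHON | cpom.py | check
-- ===== SOURCE A (Python) =====
-- from collections import Counter as c
--
-- def check(I,P):
--     d1=c(I);d2=c(P)
--     for key in d1:
--         x=d1[key]
--         y=d2[key]
--         if(x<=y):
--             continue
--         else:
--             return False
--     return True
-- ===== SOURCE B (Python) =====
-- from collections import Counter as c
--
-- def check(I, P):
--     budget = c(P)
--     for ch in I:
--         budget[ch] -= 1
--         if budget[ch] < 0:
--             return False
--     return True
-- ===== Notes on version B (the rewrite author's own statement) =====
-- stated objective: simpler
-- what changed: B keeps a single running budget counter built from P and decrements it per character of I, returning False on the first overdraft, instead of building two counters and comparing them key by key.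
import Mathlib
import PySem

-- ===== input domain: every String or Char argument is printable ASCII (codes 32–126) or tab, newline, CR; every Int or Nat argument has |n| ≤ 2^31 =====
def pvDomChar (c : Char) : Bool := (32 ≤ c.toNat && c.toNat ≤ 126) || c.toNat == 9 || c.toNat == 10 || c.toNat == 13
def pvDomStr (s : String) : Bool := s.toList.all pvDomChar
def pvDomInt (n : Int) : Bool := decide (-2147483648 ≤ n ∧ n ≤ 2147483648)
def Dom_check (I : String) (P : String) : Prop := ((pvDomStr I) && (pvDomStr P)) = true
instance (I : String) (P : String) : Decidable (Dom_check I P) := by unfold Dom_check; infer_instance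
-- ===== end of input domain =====

-- B builds one running budget counter from P and decrements it per char of I (simpler single loop);
-- A builds two counters and compares them key by key.

-- ===== PORT A =====
-- the 'for key in d1' early-return loop of A
def checkLoopA (d1 d2 : PySem.Dict Char Int) : List Char → Bool
  | [] => true
  | k :: ks =>
      let x := d1.getD k 0
      let y := d2.getD k 0
      if x ≤ y then checkLoopA d1 d2 ks else false

def check (I : String) (P : String) : Bool :=
  let d1 := PySem.Dict.counter I.toList
  let d2 := PySem.Dict.counter P.toList
  checkLoopA d1 d2 d1.keys

-- ===== PORT B =====
-- the 'for ch in I' loop of B: budget[ch] -= 1; return False if it went negative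
def checkLoopB (budget : PySem.Dict Char Int) : List Char → Bool
  | [] => true
  | ch :: rest =>
      let b := budget.modify ch 0 (· - 1)
      if b.getD ch 0 < 0 then false else checkLoopB b rest

def check_alt (I : String) (P : String) : Bool :=
  checkLoopB (PySem.Dict.counter P.toList) I.toList

-- ===== PRECONDITION & SPEC =====
def Spec_check (I : String) (P : String) (out : Bool) : Prop := out = check_alt I P
instance (I : String) (P : String) (out : Bool) : Decidable (Spec_check I P out) := by unfold Spec_check; infer_instance

-- ===== CLAIM (what is proved, stated in full; the proofs are below) =====
def Claim_equal_check : Prop := ∀ (I : String) (P : String), Dom_check I P → Spec_check I P (check I P)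

-- ===== LEMMAS AND PROOFS =====

-- A's loop is the pointwise comparison over the visited keys
theorem checkLoopA_eq_decide (d1 d2 : PySem.Dict Char Int) (ks : List Char) :
    checkLoopA d1 d2 ks = decide (∀ k ∈ ks, d1.getD k 0 ≤ d2.getD k 0) := by
  induction ks with
  | nil => simp [checkLoopA]
  | cons k ks ih =>
      by_cases h : d1.getD k 0 ≤ d2.getD k 0
      · simp [checkLoopA, h, ih]
      · simp [checkLoopA, h]

-- B's loop succeeds iff every character's demand in the remaining input fits in the budget
theorem checkLoopB_eq_decide (rest : List Char) : ∀ (budget : PySem.Dict Char Int),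
    checkLoopB budget rest = decide (∀ c ∈ rest, (rest.count c : Int) ≤ budget.getD c 0) := by
  induction rest with
  | nil => intro budget; simp [checkLoopB]
  | cons ch r ih =>
      intro budget
      have hstep : checkLoopB budget (ch :: r) =
          if (budget.modify ch 0 (· - 1)).getD ch 0 < 0 then false
          else checkLoopB (budget.modify ch 0 (· - 1)) r := rfl
      have hb : ∀ c, (budget.modify ch 0 (· - 1)).getD c 0 =
          if c = ch then budget.getD ch 0 - 1 else budget.getD c 0 :=
        fun c => PySem.Dict.getD_modify budget ch c 0 (· - 1)
      have hbch : (budget.modify ch 0 (· - 1)).getD ch 0 = budget.getD ch 0 - 1 := by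
        rw [hb ch, if_pos rfl]
      have hkey : (∀ c ∈ r, ((r.count c : Int)) ≤ (budget.modify ch 0 (· - 1)).getD c 0) ↔
          (∀ c ∈ r, (((ch :: r).count c : Int)) ≤ budget.getD c 0) := by
        constructor
        · intro hall c hc
          have h := hall c hc
          rw [hb c] at h
          by_cases hcc : c = ch
          · rw [if_pos hcc] at h
            subst hcc
            rw [List.count_cons_self]
            push_cast; omega
          · rw [if_neg hcc] at h
            have hcount : (ch :: r).count c = r.count c := by
              simp [Ne.symm hcc]
            rw [hcount]; exact h
        · intro hall c hc
          have h := hall c hc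
          rw [hb c]
          by_cases hcc : c = ch
          · rw [if_pos hcc]
            subst hcc
            rw [List.count_cons_self] at h
            push_cast at h; omega
          · rw [if_neg hcc]
            have hcount : (ch :: r).count c = r.count c := by
              simp [Ne.symm hcc]
            rw [hcount] at h; exact h
      by_cases hneg : (budget.modify ch 0 (· - 1)).getD ch 0 < 0
      · have hfalse : ¬ (∀ c ∈ ch :: r, (((ch :: r).count c : Int)) ≤ budget.getD c 0) := by
          intro hall
          have h := hall ch (by simp)
          rw [List.count_cons_self] at h
          push_cast at h; omega
        rw [hstep, if_pos hneg]
        exact (decide_eq_false hfalse).symm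
      · rw [hstep, if_neg hneg, ih]
        congr 1
        apply propext
        constructor
        · intro hall c hc
          rcases List.mem_cons.mp hc with hcc | hcr
          · subst hcc
            by_cases hcr2 : c ∈ r
            · exact hkey.mp hall c hcr2
            · rw [List.count_cons_self, List.count_eq_zero_of_not_mem hcr2]
              push_cast; omega
          · exact hkey.mp hall c hcr
        · intro hall
          exact hkey.mpr (fun c hc => hall c (List.mem_cons_of_mem ch hc))

theorem check_eq_alt (I P : String) : check I P = check_alt I P := by
  unfold check check_alt
  rw [checkLoopA_eq_decide, checkLoopB_eq_decide]
  congr 1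
  apply propext
  constructor
  · intro hall c hc
    have hmem : c ∈ (PySem.Dict.counter I.toList).keys := by
      rw [PySem.Dict.keys_counter]
      exact (PySem.Set.mem_ofList _ _).mpr hc
    have := hall c hmem
    rw [PySem.Dict.getD_counter, PySem.Dict.getD_counter] at this
    rw [PySem.Dict.getD_counter]
    exact this
  · intro hall c hc
    have hmem : c ∈ I.toList := by
      rw [PySem.Dict.keys_counter] at hc
      exact (PySem.Set.mem_ofList _ _).mp hc
    have := hall c hmem
    rw [PySem.Dict.getD_counter] at this
    rw [PySem.Dict.getD_counter, PySem.Dict.getD_counter]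
    exact this

-- ===== VERDICT (by name: the statement is the Claim_ definition above) =====
theorem check_spec : Claim_equal_check := by
  intro I P _
  unfold Spec_check
  exact check_eq_alt I P
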